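-- pv_equiv track=rewrite | github.com/Mezghenna-Mohanned/Chess-Engine-Jinxy | RookBFS.py | bfs_rook_to_king
-- ===== SOURCE A (Python) =====
-- from collections import deque
--
-- columns = ['a', 'b', 'c', 'd', 'e', 'f', 'g', 'h']
--
-- rows = ['8', '7', '6', '5', '4', '3', '2', '1']
--
-- rook_directions = [(1, 0), (-1, 0), (0, 1), (0, -1)]
--
-- def get_valid_rook_moves(rook_position):
--     valid_moves = []
--     col_index = columns.index(rook_position[0])
--     row_index = rows.index(rook_position[1])
--
--     for direction in rook_directions:
--         for step in range(1, 8):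
--             new_col_index = col_index + direction[0] * step
--             new_row_index = row_index + direction[1] * step
--
--             if 0 <= new_col_index < 8 and 0 <= new_row_index < 8:
--                 new_position = f"{columns[new_col_index]}{rows[new_row_index]}"
--                 valid_moves.append(new_position)
--             else:
--                 break
--
--     return valid_moves
--
-- def bfs_rook_to_king(rook_position, king_position):
--     queue = deque([(rook_position, [rook_position])])
--     visited = set()
--
--     while queue:
--         current_position, path = queue.popleft()
--
--         if current_position == king_position:
--             return path
--
--         visited.add(current_position)
--
--         for move in get_valid_rook_moves(current_position):
--             if move not in visited:
--                 queue.append((move, path + [move]))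
--
--     return None
-- ===== SOURCE B (Python) =====
-- columns = ['a', 'b', 'c', 'd', 'e', 'f', 'g', 'h']
--
-- rows = ['8', '7', '6', '5', '4', '3', '2', '1']
--
-- def bfs_rook_to_king(rook_position, king_position):
--     if rook_position == king_position:
--         return [rook_position]
--     col_index = columns.index(rook_position[0])
--     row_index = rows.index(rook_position[1])
--     if len(king_position) != 2 or king_position[0] not in columns or king_position[1] not in rows:
--         return None
--     king_col = columns.index(king_position[0])
--     king_row = rows.index(king_position[1])
--     if king_col == col_index or king_row == row_index:
--         return [rook_position, king_position]
--     return [rook_position, columns[king_col] + rows[row_index], king_position]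
-- ===== Notes on version B (the rewrite author's own statement) =====
-- stated objective: simpler
-- what changed: Replaces the breadth-first search over the whole board with the closed-form rook path: same square -> [rook], shared file/rank -> [rook, king], otherwise [rook, king-file+rook-rank intermediate, king], reproducing the BFS queue order's tie-break.
-- intended difference: When rook_position is a longer string whose first two characters spell exactly the king's own square (e.g. ('a1x','a1')), A returns a spurious two-move detour ['a1x','b1','a1'] while B returns the direct ['a1x','a1']; B's value is intended since the rook already stands on the king's square. — e.g. on bfs_rook_to_king("a1x", "a1"): A returns some ["a1x", "b1", "a1"], B returns some ["a1x", "a1"]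
import Mathlib
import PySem

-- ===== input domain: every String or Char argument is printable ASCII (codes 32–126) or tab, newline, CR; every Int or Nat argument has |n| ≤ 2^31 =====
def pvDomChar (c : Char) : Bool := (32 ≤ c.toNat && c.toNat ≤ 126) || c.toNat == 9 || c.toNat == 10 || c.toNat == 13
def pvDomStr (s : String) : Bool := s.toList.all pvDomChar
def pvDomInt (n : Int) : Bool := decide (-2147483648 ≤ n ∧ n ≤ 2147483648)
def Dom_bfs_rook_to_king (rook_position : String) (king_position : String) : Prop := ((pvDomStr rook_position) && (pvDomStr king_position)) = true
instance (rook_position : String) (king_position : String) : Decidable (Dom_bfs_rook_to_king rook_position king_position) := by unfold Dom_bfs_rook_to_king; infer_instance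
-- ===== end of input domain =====

-- B replaces A's breadth-first search by the closed-form rook path (0, 1 or 2 moves); objective: simpler/faster.

-- ===== PORT A =====
def pvColumns : List Char := ['a', 'b', 'c', 'd', 'e', 'f', 'g', 'h']
def pvRows : List Char := ['8', '7', '6', '5', '4', '3', '2', '1']
def pvDirections : List (Int × Int) := [(1, 0), (-1, 0), (0, 1), (0, -1)]

-- f"{columns[nc]}{rows[nr]}"; the getD defaults are never used: both indices are bounds-checked just before
def pvSqI (ci ri : Int) : String :=
  String.ofList [(PySem.List.pyGet? pvColumns ci).getD 'a', (PySem.List.pyGet? pvRows ri).getD '8']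

-- inner 'for step in range(1, 8)' with break; `rem` counts the remaining steps, `step` is Python's step
def pvRay (ci ri dc dr : Int) : Nat → Int → List String
  | 0, _ => []
  | rem + 1, step =>
    let nc := ci + dc * step
    let nr := ri + dr * step
    if 0 ≤ nc ∧ nc < 8 ∧ 0 ≤ nr ∧ nr < 8 then
      pvSqI nc nr :: pvRay ci ri dc dr rem (step + 1)
    else []

-- get_valid_rook_moves after the two index() calls
def pvMovesFrom (ci ri : Int) : List String :=
  pvDirections.flatMap (fun d => pvRay ci ri d.1 d.2 7 1)

-- get_valid_rook_moves; none = the IndexError/ValueError of rook_position[0]/[1]/index()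
def getValidRookMovesOpt (pos : String) : Option (List String) :=
  match PySem.Str.pyGet? pos 0 with
  | none => none
  | some c0 =>
    match PySem.List.index? pvColumns c0 with
    | none => none
    | some ci =>
      match PySem.Str.pyGet? pos 1 with
      | none => none
      | some c1 =>
        match PySem.List.index? pvRows c1 with
        | none => none
        | some ri => some (pvMovesFrom (ci : Int) (ri : Int))

-- the while-queue loop; fuel only makes it total (1000 exceeds the pops of any returning run of A)
def pvBfsLoop (king : String) : Nat → List (String × List String) → PySem.Set String → Option (List String)
  | 0, _, _ => none
  | _ + 1, [], _ => none
  | fuel + 1, (cur, path) :: rest, vis =>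
    if cur == king then some path
    else
      let vis' := PySem.Set.add vis cur
      match getValidRookMovesOpt cur with
      | none => none   -- Python raises here; such inputs are outside Pre_
      | some mv =>
        pvBfsLoop king fuel
          (rest ++ (mv.filter (fun m => !(PySem.Set.contains vis' m))).map (fun m => (m, path ++ [m])))
          vis'

def bfs_rook_to_king (rook_position : String) (king_position : String) : Option (List String) :=
  pvBfsLoop king_position 1000 [(rook_position, [rook_position])] PySem.Set.empty

-- ===== PORT B =====
def bfs_rook_to_king_alt (rook_position : String) (king_position : String) : Option (List String) :=
  if rook_position == king_position then some [rook_position]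
  else
    match PySem.Str.pyGet? rook_position 0 with
    | none => none      -- IndexError (outside Pre_)
    | some r0 =>
      match PySem.List.index? pvColumns r0 with
      | none => none    -- ValueError (outside Pre_)
      | some ci =>
        match PySem.Str.pyGet? rook_position 1 with
        | none => none  -- IndexError (outside Pre_)
        | some r1 =>
          match PySem.List.index? pvRows r1 with
          | none => none  -- ValueError (outside Pre_)
          | some ri =>
            -- 'if len(king)!=2 or king[0] not in columns or king[1] not in rows: return None'
            match king_position.toList with
            | [k0, k1] =>
              if k0 ∈ pvColumns ∧ k1 ∈ pvRows then
                match PySem.List.index? pvColumns k0, PySem.List.index? pvRows k1 with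
                | some kc, some kr =>
                  if kc = ci ∨ kr = ri then some [rook_position, king_position]
                  else some [rook_position, String.ofList [pvColumns[kc]!, pvRows[ri]!], king_position]
                | _, _ => none  -- unreachable: membership was just checked
              else none
            | _ => none

-- ===== PRECONDITION & SPEC =====
-- Pre_ excludes exactly the inputs where A raises: rook_position ≠ king_position with rook_position
-- shorter than 2 chars (IndexError) or its first two chars not a valid file/rank (ValueError).
def Pre_bfs_rook_to_king (rook_position : String) (king_position : String) : Prop :=
  rook_position = king_position ∨
    ((rook_position.toList[0]?.any pvColumns.contains = true) ∧
     (rook_position.toList[1]?.any pvRows.contains = true))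
instance (rook_position : String) (king_position : String) : Decidable (Pre_bfs_rook_to_king rook_position king_position) := by
  unfold Pre_bfs_rook_to_king; infer_instance

def pvWitness_bfs_rook_to_king : String × String := ("e4", "h8")

-- On inputs where rook_position is a longer string whose first two chars spell exactly the king's own
-- square (e.g. "a1x" vs king "a1"), A returns a spurious two-move detour ["a1x","b1","a1"] while B
-- returns the direct ["a1x","a1"]; B's value is intended since the rook already stands on the king's square.
def D_bfs_rook_to_king (rook_position : String) (king_position : String) : Prop :=
  rook_position ≠ king_position ∧
  king_position.length = 2 ∧
  (king_position.toList[0]?.any pvColumns.contains = true) ∧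
  (king_position.toList[1]?.any pvRows.contains = true) ∧
  rook_position.toList[0]? = king_position.toList[0]? ∧
  rook_position.toList[1]? = king_position.toList[1]?
instance (rook_position : String) (king_position : String) : Decidable (D_bfs_rook_to_king rook_position king_position) := by
  unfold D_bfs_rook_to_king; infer_instance

def Spec_bfs_rook_to_king (rook_position : String) (king_position : String) (out : Option (List String)) : Prop :=
  ¬ D_bfs_rook_to_king rook_position king_position → out = bfs_rook_to_king_alt rook_position king_position
instance (rook_position : String) (king_position : String) (out : Option (List String)) : Decidable (Spec_bfs_rook_to_king rook_position king_position out) := by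
  unfold Spec_bfs_rook_to_king; infer_instance

def pvDiffWitness_bfs_rook_to_king : String × String := ("a1x", "a1")
def pvDiffWitnessOut_bfs_rook_to_king : (Option (List String)) × (Option (List String)) :=
  (some ["a1x", "b1", "a1"], some ["a1x", "a1"])

-- ===== CLAIM (what is proved, stated in full; the proofs are below) =====
def Claim_unchanged_bfs_rook_to_king : Prop := ∀ (rook_position : String) (king_position : String), Dom_bfs_rook_to_king rook_position king_position → Pre_bfs_rook_to_king rook_position king_position → Spec_bfs_rook_to_king rook_position king_position (bfs_rook_to_king rook_position king_position)
def Claim_changed_bfs_rook_to_king : Prop := Dom_bfs_rook_to_king (pvDiffWitness_bfs_rook_to_king.1) (pvDiffWitness_bfs_rook_to_king.2) ∧ Pre_bfs_rook_to_king (pvDiffWitness_bfs_rook_to_king.1) (pvDiffWitness_bfs_rook_to_king.2) ∧ D_bfs_rook_to_king (pvDiffWitness_bfs_rook_to_king.1) (pvDiffWitness_bfs_rook_to_king.2) ∧ bfs_rook_to_king (pvDiffWitness_bfs_rook_to_king.1) (pvDiffWitness_bfs_rook_to_king.2) = pvDiffWitnessOut_bfs_rook_to_king.1 ∧ bfs_rook_to_king_alt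 (pvDiffWitness_bfs_rook_to_king.1) (pvDiffWitness_bfs_rook_to_king.2) = pvDiffWitnessOut_bfs_rook_to_king.2 ∧ pvDiffWitnessOut_bfs_rook_to_king.1 ≠ pvDiffWitnessOut_bfs_rook_to_king.2
def Claim_exact_bfs_rook_to_king : Prop := ∀ (rook_position : String) (king_position : String), Dom_bfs_rook_to_king rook_position king_position → Pre_bfs_rook_to_king rook_position king_position → D_bfs_rook_to_king rook_position king_position → bfs_rook_to_king rook_position king_position ≠ bfs_rook_to_king_alt rook_position king_position

-- ===== LEMMAS AND PROOFS =====

-- the canonical square string with file i, rank-row j (Nat indices < 8)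
def pvSq (i j : Nat) : String := String.ofList [pvColumns[i]?.getD 'A', pvRows[j]?.getD 'A']

def CanonP (s : String) : Prop := ∃ i, i < 8 ∧ ∃ j, j < 8 ∧ s = pvSq i j

theorem cols_inj : ∀ i < 8, ∀ i' < 8, pvColumns[i]?.getD 'A' = pvColumns[i']?.getD 'A' → i = i' := by decide

theorem rows_inj : ∀ j < 8, ∀ j' < 8, pvRows[j]?.getD 'A' = pvRows[j']?.getD 'A' → j = j' := by decide

theorem pvSq_inj {i j i' j' : Nat} (hi : i < 8) (hj : j < 8) (hi' : i' < 8) (hj' : j' < 8)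
    (h : pvSq i j = pvSq i' j') : i = i' ∧ j = j' := by
  have := congrArg String.toList h
  simp [pvSq] at this
  exact ⟨cols_inj i hi i' hi' this.1, rows_inj j hj j' hj' this.2⟩

theorem pvSq_toList (i j : Nat) : (pvSq i j).toList = [pvColumns[i]?.getD 'A', pvRows[j]?.getD 'A'] := by
  simp [pvSq]

theorem pvSq_len (i j : Nat) : (pvSq i j).length = 2 := by simp [pvSq]

theorem getBang_eq_pvSq : ∀ i < 8, ∀ j < 8, String.ofList [pvColumns[i]!, pvRows[j]!] = pvSq i j := by
  decide

theorem col_mem : ∀ i < 8, pvColumns.contains (pvColumns[i]?.getD 'A') = true := by decide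

theorem row_mem : ∀ j < 8, pvRows.contains (pvRows[j]?.getD 'A') = true := by decide

-- a is in pvColumns: extract its index and the round trip
theorem col_of_mem {a : Char} (h : pvColumns.contains a = true) :
    ∃ c, c < 8 ∧ PySem.List.index? pvColumns a = some c ∧ pvColumns[c]?.getD 'A' = a := by
  have hm : a ∈ pvColumns := by simpa using h
  obtain ⟨k, hk⟩ := Option.isSome_iff_exists.1 ((PySem.List.index?_isSome_iff pvColumns a).2 hm)
  obtain ⟨hlt, he, -⟩ := PySem.List.getElem_of_index?_eq_some hk
  exact ⟨k, by simpa [pvColumns] using hlt, hk, by simp [List.getElem?_eq_getElem hlt, he]⟩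

theorem row_of_mem {b : Char} (h : pvRows.contains b = true) :
    ∃ r, r < 8 ∧ PySem.List.index? pvRows b = some r ∧ pvRows[r]?.getD 'A' = b := by
  have hm : b ∈ pvRows := by simpa using h
  obtain ⟨k, hk⟩ := Option.isSome_iff_exists.1 ((PySem.List.index?_isSome_iff pvRows b).2 hm)
  obtain ⟨hlt, he, -⟩ := PySem.List.getElem_of_index?_eq_some hk
  exact ⟨k, by simpa [pvRows] using hlt, hk, by simp [List.getElem?_eq_getElem hlt, he]⟩

theorem index?_columns : ∀ i < 8, PySem.List.index? pvColumns (pvColumns[i]?.getD 'A') = some i := by decide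

theorem index?_rows : ∀ j < 8, PySem.List.index? pvRows (pvRows[j]?.getD 'A') = some j := by decide

theorem pvSqI_eq (ci ri : Int) (h1 : 0 ≤ ci) (h2 : ci < 8) (h3 : 0 ≤ ri) (h4 : ri < 8) :
    pvSqI ci ri = pvSq ci.toNat ri.toNat := by
  have hc : ci.toNat < pvColumns.length := by simp [pvColumns]; omega
  have hr : ri.toNat < pvRows.length := by simp [pvRows]; omega
  simp [pvSqI, pvSq, PySem.List.pyGet?_of_nonneg _ h1, PySem.List.pyGet?_of_nonneg _ h3, hc, hr]

-- every ray element is the square at step s in the given direction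
theorem ray_shape (ci ri dc dr : Int) :
    ∀ rem (step : Int) x, x ∈ pvRay ci ri dc dr rem step →
      ∃ s : Int, step ≤ s ∧ 0 ≤ ci + dc * s ∧ ci + dc * s < 8 ∧ 0 ≤ ri + dr * s ∧ ri + dr * s < 8 ∧
        x = pvSqI (ci + dc * s) (ri + dr * s) := by
  intro rem
  induction rem with
  | zero => intro step x hx; simp [pvRay] at hx
  | succ n ih =>
    intro step x hx
    simp only [pvRay] at hx
    split at hx
    · rcases List.mem_cons.1 hx with h | h
      · exact ⟨step, le_refl _, by tauto, by tauto, by tauto, by tauto, h⟩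
      · obtain ⟨s, hs1, h2, h3, h4, h5, h6⟩ := ih (step + 1) x h
        exact ⟨s, by omega, h2, h3, h4, h5, h6⟩
    · simp at hx

theorem ray_mem (ci ri dc dr : Int) (s0 : Int) :
    ∀ (rem : Nat) (step : Int), step ≤ s0 → s0 < step + (rem : Int) →
      (∀ s : Int, step ≤ s → s ≤ s0 → 0 ≤ ci + dc * s ∧ ci + dc * s < 8 ∧ 0 ≤ ri + dr * s ∧ ri + dr * s < 8) →
      pvSqI (ci + dc * s0) (ri + dr * s0) ∈ pvRay ci ri dc dr rem step := by
  intro rem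
  induction rem with
  | zero => intro step h1 h2 _; simp at h2; omega
  | succ n ih =>
    intro step h1 h2 hb
    have hstep := hb step (le_refl _) h1
    simp only [pvRay]
    rw [if_pos (by tauto)]
    rcases eq_or_lt_of_le h1 with he | hlt
    · rw [he]; exact List.mem_cons_self
    · exact List.mem_cons_of_mem _ (ih (step + 1) (by omega) (by omega)
        (fun s hs1 hs2 => hb s (by omega) hs2))

theorem ray_len (ci ri dc dr : Int) : ∀ rem step, (pvRay ci ri dc dr rem step).length ≤ rem := by
  intro rem
  induction rem with
  | zero => intro step; simp [pvRay]
  | succ n ih =>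
    intro step
    simp only [pvRay]
    split
    · simpa using Nat.succ_le_succ (ih (step + 1))
    · simp

theorem movesFrom_eq (ci ri : Int) :
    pvMovesFrom ci ri =
      (pvRay ci ri 1 0 7 1 ++ pvRay ci ri (-1) 0 7 1) ++ (pvRay ci ri 0 1 7 1 ++ pvRay ci ri 0 (-1) 7 1) := by
  simp [pvMovesFrom, pvDirections]

theorem movesFrom_len (ci ri : Int) : (pvMovesFrom ci ri).length ≤ 28 := by
  rw [movesFrom_eq]
  have a := ray_len ci ri 1 0 7 1
  have b := ray_len ci ri (-1) 0 7 1
  have c := ray_len ci ri 0 1 7 1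
  have d := ray_len ci ri 0 (-1) 7 1
  simp only [List.length_append]
  omega

theorem rowMoves_shape (c r : Nat) (hc : c < 8) (_hr : r < 8) :
    ∀ x ∈ pvRay (c : Int) (r : Int) 1 0 7 1 ++ pvRay (c : Int) (r : Int) (-1) 0 7 1,
      ∃ i, i < 8 ∧ x = pvSq i r ∧ i ≠ c := by
  intro x hx
  rcases List.mem_append.1 hx with h | h
  · obtain ⟨s, hs, b1, b2, b3, b4, hx'⟩ := ray_shape (c : Int) (r : Int) 1 0 7 1 x h
    refine ⟨((c : Int) + 1 * s).toNat, by omega, ?_, by omega⟩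
    rw [hx', pvSqI_eq _ _ b1 b2 b3 b4]
    congr 1
    omega
  · obtain ⟨s, hs, b1, b2, b3, b4, hx'⟩ := ray_shape (c : Int) (r : Int) (-1) 0 7 1 x h
    refine ⟨((c : Int) + (-1) * s).toNat, by omega, ?_, by omega⟩
    rw [hx', pvSqI_eq _ _ b1 b2 b3 b4]
    congr 1
    omega

theorem colMoves_shape (c r : Nat) (_hc : c < 8) (hr : r < 8) :
    ∀ x ∈ pvRay (c : Int) (r : Int) 0 1 7 1 ++ pvRay (c : Int) (r : Int) 0 (-1) 7 1,
      ∃ j, j < 8 ∧ x = pvSq c j ∧ j ≠ r := by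
  intro x hx
  rcases List.mem_append.1 hx with h | h
  · obtain ⟨s, hs, b1, b2, b3, b4, hx'⟩ := ray_shape (c : Int) (r : Int) 0 1 7 1 x h
    refine ⟨((r : Int) + 1 * s).toNat, by omega, ?_, by omega⟩
    rw [hx', pvSqI_eq _ _ b1 b2 b3 b4]
    congr 1
    omega
  · obtain ⟨s, hs, b1, b2, b3, b4, hx'⟩ := ray_shape (c : Int) (r : Int) 0 (-1) 7 1 x h
    refine ⟨((r : Int) + (-1) * s).toNat, by omega, ?_, by omega⟩
    rw [hx', pvSqI_eq _ _ b1 b2 b3 b4]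
    congr 1
    omega

-- shape of a move from square (c, r)
theorem moves_shape (c r : Nat) (hc : c < 8) (hr : r < 8) :
    ∀ x ∈ pvMovesFrom (c : Int) (r : Int),
      ∃ i, i < 8 ∧ ∃ j, j < 8 ∧ x = pvSq i j ∧ ((j = r ∧ i ≠ c) ∨ (i = c ∧ j ≠ r)) := by
  intro x hx
  rw [movesFrom_eq] at hx
  rcases List.mem_append.1 hx with h | h
  · obtain ⟨i, hi, he, hne⟩ := rowMoves_shape c r hc hr x h
    exact ⟨i, hi, r, hr, he, Or.inl ⟨rfl, hne⟩⟩
  · obtain ⟨j, hj, he, hne⟩ := colMoves_shape c r hc hr x h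
    exact ⟨c, hc, j, hj, he, Or.inr ⟨rfl, hne⟩⟩

theorem mem_rowMoves (c r i : Nat) (hc : c < 8) (hr : r < 8) (hi : i < 8) (hne : i ≠ c) :
    pvSq i r ∈ pvRay (c : Int) (r : Int) 1 0 7 1 ++ pvRay (c : Int) (r : Int) (-1) 0 7 1 := by
  rcases Nat.lt_or_ge c i with hlt | hge
  · apply List.mem_append_left
    have hm := ray_mem (c : Int) (r : Int) 1 0 ((i : Int) - (c : Int)) 7 1 (by omega) (by omega)
      (fun s hs1 hs2 => by refine ⟨by omega, by omega, by omega, by omega⟩)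
    have he : pvSqI ((c : Int) + 1 * ((i : Int) - (c : Int))) ((r : Int) + 0 * ((i : Int) - (c : Int))) = pvSq i r := by
      rw [pvSqI_eq _ _ (by omega) (by omega) (by omega) (by omega)]
      congr 1 <;> omega
    rwa [he] at hm
  · have hlt : i < c := by omega
    apply List.mem_append_right
    have hm := ray_mem (c : Int) (r : Int) (-1) 0 ((c : Int) - (i : Int)) 7 1 (by omega) (by omega)
      (fun s hs1 hs2 => by refine ⟨by omega, by omega, by omega, by omega⟩)
    have he : pvSqI ((c : Int) + (-1) * ((c : Int) - (i : Int))) ((r : Int) + 0 * ((c : Int) - (i : Int))) = pvSq i r := by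
      rw [pvSqI_eq _ _ (by omega) (by omega) (by omega) (by omega)]
      congr 1 <;> omega
    rwa [he] at hm

theorem mem_colMoves (c r j : Nat) (hc : c < 8) (hr : r < 8) (hj : j < 8) (hne : j ≠ r) :
    pvSq c j ∈ pvRay (c : Int) (r : Int) 0 1 7 1 ++ pvRay (c : Int) (r : Int) 0 (-1) 7 1 := by
  rcases Nat.lt_or_ge r j with hlt | hge
  · apply List.mem_append_left
    have hm := ray_mem (c : Int) (r : Int) 0 1 ((j : Int) - (r : Int)) 7 1 (by omega) (by omega)
      (fun s hs1 hs2 => by refine ⟨by omega, by omega, by omega, by omega⟩)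
    have he : pvSqI ((c : Int) + 0 * ((j : Int) - (r : Int))) ((r : Int) + 1 * ((j : Int) - (r : Int))) = pvSq c j := by
      rw [pvSqI_eq _ _ (by omega) (by omega) (by omega) (by omega)]
      congr 1 <;> omega
    rwa [he] at hm
  · have hlt : j < r := by omega
    apply List.mem_append_right
    have hm := ray_mem (c : Int) (r : Int) 0 (-1) ((r : Int) - (j : Int)) 7 1 (by omega) (by omega)
      (fun s hs1 hs2 => by refine ⟨by omega, by omega, by omega, by omega⟩)
    have he : pvSqI ((c : Int) + 0 * ((r : Int) - (j : Int))) ((r : Int) + (-1) * ((r : Int) - (j : Int))) = pvSq c j := by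
      rw [pvSqI_eq _ _ (by omega) (by omega) (by omega) (by omega)]
      congr 1 <;> omega
    rwa [he] at hm

-- moves of a canonical square are defined and are pvMovesFrom of its coordinates
theorem movesOpt_canon_aux :
    ∀ i < 8, ∀ j < 8, getValidRookMovesOpt (pvSq i j) = some (pvMovesFrom (i : Int) (j : Int)) := by
  decide

theorem movesOpt_canon (i j : Nat) (hi : i < 8) (hj : j < 8) :
    getValidRookMovesOpt (pvSq i j) = some (pvMovesFrom (i : Int) (j : Int)) :=
  movesOpt_canon_aux i hi j hj

theorem movesOpt_canon' {p : String} (h : CanonP p) : ∃ l, getValidRookMovesOpt p = some l := by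
  obtain ⟨i, hi, j, hj, rfl⟩ := h
  exact ⟨_, movesOpt_canon i j hi hj⟩

-- everything getValidRookMovesOpt returns consists of canonical squares
theorem movesOpt_elems {p : String} {l : List String} (h : getValidRookMovesOpt p = some l) :
    (∀ x ∈ l, CanonP x) ∧ l.length ≤ 28 := by
  unfold getValidRookMovesOpt at h
  repeat' split at h
  all_goals cases h
  rename_i x0 a hpa x1 ci hci x2 b hpb x3 ri hri
  obtain ⟨hklt, -, -⟩ := PySem.List.getElem_of_index?_eq_some hci
  obtain ⟨hklt', -, -⟩ := PySem.List.getElem_of_index?_eq_some hri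
  have hci8 : ci < 8 := by simpa [pvColumns] using hklt
  have hri8 : ri < 8 := by simpa [pvRows] using hklt'
  constructor
  · intro x hx
    obtain ⟨i, hi, j, hj, he, -⟩ := moves_shape ci ri hci8 hri8 x hx
    exact ⟨i, hi, j, hj, he⟩
  · exact movesFrom_len _ _

-- first-occurrence split
theorem first_split {α : Type} [DecidableEq α] {x : α} {l : List α} (h : x ∈ l) :
    ∃ l1 l2, l = l1 ++ x :: l2 ∧ x ∉ l1 := by
  induction l with
  | nil => cases h
  | cons a l ih =>
    by_cases ha : a = x
    · exact ⟨[], l, by simp [ha], List.not_mem_nil⟩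
    · have hm : x ∈ l := by
        rcases List.mem_cons.1 h with h' | h'
        · exact absurd h'.symm ha
        · exact h'
      obtain ⟨l1, l2, he, hn⟩ := ih hm
      exact ⟨a :: l1, l2, by simp [he], by
        simp only [List.mem_cons, not_or]
        exact ⟨fun h' => ha h'.symm, hn⟩⟩

theorem contains_add_false {s : PySem.Set String} {x k : String}
    (h : PySem.Set.contains s k = false) (hx : x ≠ k) :
    PySem.Set.contains (PySem.Set.add s x) k = false := by
  simp [PySem.Set.add, PySem.Set.contains] at *
  split <;> simp_all [eq_comm]

-- FIFO: the first queue entry carrying the king's square is returned, with its recorded path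
theorem bfs_first_hit (king : String) :
    ∀ (q1 : List (String × List String)) (fuel : Nat) (pth : List String) q2 vis,
      (∀ e ∈ q1, e.1 ≠ king ∧ getValidRookMovesOpt e.1 ≠ none) →
      q1.length < fuel →
      pvBfsLoop king fuel (q1 ++ (king, pth) :: q2) vis = some pth := by
  intro q1
  induction q1 with
  | nil =>
    rintro (_ | fuel) pth q2 vis _ hf
    · omega
    · simp [pvBfsLoop]
  | cons e q1' ih =>
    rintro (_ | fuel) pth q2 vis hq hf
    · omega
    · obtain ⟨cur, p⟩ := e
      have h1 : cur ≠ king := (hq _ List.mem_cons_self).1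
      obtain ⟨mv, hmv⟩ : ∃ l, getValidRookMovesOpt cur = some l := by
        cases h : getValidRookMovesOpt cur
        · exact absurd h (hq _ List.mem_cons_self).2
        · exact ⟨_, rfl⟩
      simp only [List.cons_append, pvBfsLoop, beq_eq_false_iff_ne.2 h1, Bool.false_eq_true,
        if_false, hmv]
      rw [List.append_assoc, List.cons_append]
      exact ih fuel pth _ _ (fun e he => hq e (List.mem_cons_of_mem _ he)) (by simp at hf ⊢; omega)

-- two-move case: the first entry whose move set contains the king wins
theorem bfs_second_hit (king : String) :
    ∀ (q1 : List (String × List String)) (fuel : Nat) (cur : String) (pth : List String) q2 vis,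
      (∀ e ∈ q1, e.1 ≠ king ∧ ∃ l, getValidRookMovesOpt e.1 = some l ∧ king ∉ l) →
      (∀ e ∈ q2, e.1 ≠ king ∧ getValidRookMovesOpt e.1 ≠ none) →
      cur ≠ king →
      (∃ l, getValidRookMovesOpt cur = some l ∧ king ∈ l) →
      PySem.Set.contains vis king = false →
      29 * q1.length + q2.length + 31 ≤ fuel →
      pvBfsLoop king fuel (q1 ++ (cur, pth) :: q2) vis = some (pth ++ [king]) := by
  intro q1
  induction q1 with
  | nil =>
    rintro (_ | fuel) cur pth q2 vis _ hq2 hcur ⟨l, hl, hkl⟩ hvis hf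
    · omega
    · simp only [List.nil_append, pvBfsLoop, beq_eq_false_iff_ne.2 hcur, Bool.false_eq_true,
        if_false, hl]
      have hvis' : PySem.Set.contains (PySem.Set.add vis cur) king = false :=
        contains_add_false hvis hcur
      have hkf : king ∈ l.filter (fun m => !(PySem.Set.contains (PySem.Set.add vis cur) m)) :=
        List.mem_filter.2 ⟨hkl, by simp only [hvis', Bool.not_false]⟩
      obtain ⟨l1, l2, hsplit, hnk⟩ := first_split hkf
      have hcanl := movesOpt_elems hl
      rw [hsplit, List.map_append, List.map_cons, ← List.append_assoc]
      apply bfs_first_hit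
      · intro e he
        rcases List.mem_append.1 he with he | he
        · exact hq2 e he
        · obtain ⟨m, hm, rfl⟩ := List.mem_map.1 he
          have hml : m ∈ l := List.mem_of_mem_filter (hsplit ▸ List.mem_append_left _ hm)
          refine ⟨fun h => hnk (h ▸ hm), ?_⟩
          obtain ⟨l', hl'⟩ := movesOpt_canon' (hcanl.1 m hml)
          simp [hl']
      · have hlen0 := congrArg List.length hsplit
        simp only [List.length_append, List.length_cons] at hlen0
        have hlen2 := List.length_filter_le (fun m => !(PySem.Set.contains (PySem.Set.add vis cur) m)) l
        have hlen1 : l1.length ≤ l.length := by omega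
        simp only [List.length_append, List.length_map]
        have := hcanl.2
        omega
  | cons e0 q1' ih =>
    rintro (_ | fuel) cur pth q2 vis hq1 hq2 hcur hk hvis hf
    · omega
    · obtain ⟨c0, p0⟩ := e0
      obtain ⟨hne0, l0, hl0, hnk0⟩ := hq1 _ List.mem_cons_self
      simp only [List.cons_append, pvBfsLoop, beq_eq_false_iff_ne.2 hne0, Bool.false_eq_true,
        if_false, hl0]
      rw [List.append_assoc, List.cons_append]
      have hcanl0 := movesOpt_elems hl0
      apply ih fuel cur pth _ _ (fun e he => hq1 e (List.mem_cons_of_mem _ he))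
      · intro e he
        rcases List.mem_append.1 he with he | he
        · exact hq2 e he
        · obtain ⟨m, hm, rfl⟩ := List.mem_map.1 he
          have hml : m ∈ l0 := List.mem_of_mem_filter hm
          refine ⟨fun h => hnk0 (h ▸ hml), ?_⟩
          obtain ⟨l', hl'⟩ := movesOpt_canon' (hcanl0.1 m hml)
          simp [hl']
      · exact hcur
      · exact hk
      · exact contains_add_false hvis hne0
      · have hb : (l0.filter (fun m => !(PySem.Set.contains (PySem.Set.add vis c0) m))).length ≤ 28 := by
          have := List.length_filter_le (fun m => !(PySem.Set.contains (PySem.Set.add vis c0) m)) l0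
          have := hcanl0.2
          omega
        simp only [List.length_append, List.length_map, List.length_cons] at hf ⊢
        omega

-- when the king string can never be produced, the search returns None
theorem bfs_drain (king : String) (hk : ¬ CanonP king) :
    ∀ (fuel : Nat) q vis, (∀ e ∈ q, e.1 ≠ king) → pvBfsLoop king fuel q vis = none := by
  intro fuel
  induction fuel with
  | zero => intro q vis _; rfl
  | succ f ih =>
    rintro (_ | ⟨⟨cur, p⟩, rest⟩) vis hq
    · rfl
    · have h1 : cur ≠ king := hq _ List.mem_cons_self
      simp only [pvBfsLoop, beq_eq_false_iff_ne.2 h1, Bool.false_eq_true, if_false]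
      cases h : getValidRookMovesOpt cur
      · rfl
      · rename_i mv
        apply ih
        intro e he
        rcases List.mem_append.1 he with he | he
        · exact hq e (List.mem_cons_of_mem _ he)
        · obtain ⟨m, hm, rfl⟩ := List.mem_map.1 he
          have hcan := ((movesOpt_elems h).1 m (List.mem_of_mem_filter hm))
          intro hx
          exact hk (hx ▸ hcan)

-- after the first pop the queue holds all moves of the rook's square, none filtered away
theorem bfs_start {rook king : String} {a b : Char} {rest : List Char} {c r : Nat}
    (hne : rook ≠ king) (hl : rook.toList = a :: b :: rest)
    (hc : PySem.List.index? pvColumns a = some c) (hr : PySem.List.index? pvRows b = some r)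
    (hnr : ∀ m ∈ pvMovesFrom (c : Int) (r : Int), m ≠ rook) :
    bfs_rook_to_king rook king =
      pvBfsLoop king 999 ((pvMovesFrom (c : Int) (r : Int)).map (fun m => (m, [rook, m])))
        (PySem.Set.add PySem.Set.empty rook) := by
  have hg0 : PySem.Str.pyGet? rook 0 = some a := by simp [hl]
  have hg1 : PySem.Str.pyGet? rook 1 = some b := by simp [hl]
  have hmv : getValidRookMovesOpt rook = some (pvMovesFrom (c : Int) (r : Int)) := by
    unfold getValidRookMovesOpt
    simp only [hg0, hc, hg1, hr]
  have hkeep : ∀ m ∈ pvMovesFrom (c : Int) (r : Int),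
      (!(PySem.Set.contains (PySem.Set.add PySem.Set.empty rook) m)) = true := by
    intro m hm
    have hne' := hnr m hm
    simp [PySem.Set.add, PySem.Set.contains, PySem.Set.empty, hne']
  show pvBfsLoop king (999 + 1) [(rook, [rook])] PySem.Set.empty = _
  simp only [pvBfsLoop, beq_eq_false_iff_ne.2 hne, Bool.false_eq_true, if_false, hmv,
    List.nil_append]
  rw [List.filter_eq_self.2 hkeep]
  rfl

-- the moves of the rook's own square never equal the rook string itself
theorem moves_ne_rook {rook : String} {a b : Char} {rest : List Char} {c r : Nat}
    (hl : rook.toList = a :: b :: rest) (hc8 : c < 8) (hr8 : r < 8)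
    (hca : pvColumns[c]?.getD 'A' = a) (hrb : pvRows[r]?.getD 'A' = b) :
    ∀ m ∈ pvMovesFrom (c : Int) (r : Int), m ≠ rook := by
  intro m hm heq
  obtain ⟨i, hi, j, hj, hme, hcond⟩ := moves_shape c r hc8 hr8 m hm
  rcases List.eq_nil_or_concat rest with hrest | _
  · -- rook is exactly the square (c, r)
    subst hrest
    have hrook : rook = pvSq c r := by
      have : rook.toList = (pvSq c r).toList := by rw [hl, pvSq_toList, hca, hrb]
      exact String.toList_inj.1 this
    rw [heq, hrook] at hme
    obtain ⟨hie, hje⟩ := pvSq_inj hc8 hr8 hi hj hme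
    rcases hcond with ⟨-, hni⟩ | ⟨-, hnj⟩
    · exact hni hie.symm
    · exact hnj hje.symm
  · -- rook is longer than two characters
    have h2 : m.length = 2 := hme ▸ pvSq_len i j
    have h3 : rook.length = rest.length + 2 := by
      simpa using congrArg List.length hl
    rename_i hne'
    obtain ⟨l', e', rfl⟩ := hne'
    rw [heq] at h2
    simp at h3
    omega

-- B's port on a canonical king square
theorem alt_canon {rook : String} {a b : Char} {rest : List Char} {c r kc kr : Nat}
    (hrk : rook ≠ pvSq kc kr) (hl : rook.toList = a :: b :: rest)
    (hc : PySem.List.index? pvColumns a = some c) (hr : PySem.List.index? pvRows b = some r)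
    (hkc8 : kc < 8) (hkr8 : kr < 8) (hr8 : r < 8) :
    bfs_rook_to_king_alt rook (pvSq kc kr) =
      if kc = c ∨ kr = r then some [rook, pvSq kc kr]
      else some [rook, pvSq kc r, pvSq kc kr] := by
  have hg0 : PySem.Str.pyGet? rook 0 = some a := by simp [hl]
  have hg1 : PySem.Str.pyGet? rook 1 = some b := by simp [hl]
  have hinc : (pvColumns[kc]?.getD 'A') ∈ pvColumns := by simpa using col_mem kc hkc8
  have hinr : (pvRows[kr]?.getD 'A') ∈ pvRows := by simpa using row_mem kr hkr8
  unfold bfs_rook_to_king_alt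
  simp only [beq_eq_false_iff_ne.2 hrk, Bool.false_eq_true, if_false, hg0, hc, hg1, hr,
    pvSq_toList, hinc, hinr, and_self, if_true, index?_columns kc hkc8, index?_rows kr hkr8,
    getBang_eq_pvSq kc hkc8 r hr8]

-- no move of any square equals a given non-corridor king square
theorem moves_ne_king {c r kc kr : Nat} (hc8 : c < 8) (hr8 : r < 8) (hkc8 : kc < 8) (hkr8 : kr < 8)
    (hkc : kc ≠ c) (hkr : kr ≠ r) :
    ∀ m ∈ pvMovesFrom (c : Int) (r : Int), m ≠ pvSq kc kr := by
  intro m hm heq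
  obtain ⟨i, hi, j, hj, rfl, hcond⟩ := moves_shape c r hc8 hr8 m hm
  obtain ⟨rfl, rfl⟩ := pvSq_inj hi hj hkc8 hkr8 heq
  rcases hcond with ⟨h1, -⟩ | ⟨h1, -⟩
  · exact hkr h1
  · exact hkc h1

-- no move of a square equals that square itself
theorem moves_ne_self {c r : Nat} (hc8 : c < 8) (hr8 : r < 8) :
    ∀ m ∈ pvMovesFrom (c : Int) (r : Int), m ≠ pvSq c r := by
  intro m hm heq
  obtain ⟨i, hi, j, hj, rfl, hcond⟩ := moves_shape c r hc8 hr8 m hm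
  obtain ⟨rfl, rfl⟩ := pvSq_inj hi hj hc8 hr8 heq
  rcases hcond with ⟨-, h⟩ | ⟨-, h⟩ <;> exact h rfl

-- ===== VERDICT (by name: the statement is the Claim_ definition above) =====
theorem bfs_rook_to_king_spec : Claim_unchanged_bfs_rook_to_king := by
  intro rook king hdom hpre
  unfold Spec_bfs_rook_to_king
  intro hnd
  by_cases hrk : rook = king
  · subst hrk
    have hA : bfs_rook_to_king rook rook = some [rook] := by
      show pvBfsLoop rook (999 + 1) [(rook, [rook])] PySem.Set.empty = some [rook]
      simp [pvBfsLoop]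
    rw [hA]
    unfold bfs_rook_to_king_alt
    simp
  · rcases hpre with rfl | ⟨hp0, hp1⟩
    · exact absurd rfl hrk
    obtain ⟨a, ha0, hamem⟩ : ∃ a, rook.toList[0]? = some a ∧ pvColumns.contains a = true := by
      cases h : rook.toList[0]? with
      | none => rw [h] at hp0; simp [Option.any] at hp0
      | some a => rw [h] at hp0; exact ⟨a, rfl, by simpa [Option.any] using hp0⟩
    obtain ⟨b, hb0, hbmem⟩ : ∃ b, rook.toList[1]? = some b ∧ pvRows.contains b = true := by
      cases h : rook.toList[1]? with
      | none => rw [h] at hp1; simp [Option.any] at hp1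
      | some b => rw [h] at hp1; exact ⟨b, rfl, by simpa [Option.any] using hp1⟩
    obtain ⟨rest, hl⟩ : ∃ rest, rook.toList = a :: b :: rest := by
      cases hT : rook.toList with
      | nil => rw [hT] at ha0; simp at ha0
      | cons x t =>
        cases t with
        | nil => rw [hT] at hb0; simp at hb0
        | cons y t2 =>
          rw [hT] at ha0 hb0
          simp at ha0 hb0
          exact ⟨t2, by rw [ha0, hb0]⟩
    obtain ⟨c, hc8, hc, hca⟩ := col_of_mem hamem
    obtain ⟨r, hr8, hr, hrb⟩ := row_of_mem hbmem
    have hnr := moves_ne_rook hl hc8 hr8 hca hrb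
    have hstart := bfs_start (c := c) (r := r) hrk hl hc hr hnr
    have hg0 : PySem.Str.pyGet? rook 0 = some a := by simp [hl]
    have hg1 : PySem.Str.pyGet? rook 1 = some b := by simp [hl]
    by_cases hcanon : CanonP king
    · obtain ⟨kc, hkc8, kr, hkr8, rfl⟩ := hcanon
      have halt := alt_canon hrk hl hc hr hkc8 hkr8 hr8
      have hallcan : ∀ m ∈ pvMovesFrom (c : Int) (r : Int), getValidRookMovesOpt m ≠ none := by
        intro m hm
        obtain ⟨i, hi, j, hj, rfl, -⟩ := moves_shape c r hc8 hr8 m hm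
        rw [movesOpt_canon i j hi hj]
        simp
      by_cases hAA : kc = c ∧ kr = r
      · -- the D_ region: excluded by hnd
        exfalso
        apply hnd
        refine ⟨hrk, pvSq_len kc kr, ?_, ?_, ?_, ?_⟩
        · simp [pvSq_toList]
          simpa using col_mem kc hkc8
        · simp [pvSq_toList]
          simpa using row_mem kr hkr8
        · rw [hl, pvSq_toList]
          simp [hAA.1, hca]
        · rw [hl, pvSq_toList]
          simp [hAA.2, hrb]
      · by_cases hcr : kc = c ∨ kr = r
        · -- one rook move
          rw [halt, if_pos hcr, hstart]
          have hkmem : pvSq kc kr ∈ pvMovesFrom (c : Int) (r : Int) := by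
            rw [movesFrom_eq]
            rcases hcr with rfl | rfl
            · have hkr : kr ≠ r := fun h => hAA ⟨rfl, h⟩
              exact List.mem_append_right _ (mem_colMoves kc r kr hkc8 hr8 hkr8 hkr)
            · have hkc : kc ≠ c := fun h => hAA ⟨h, rfl⟩
              exact List.mem_append_left _ (mem_rowMoves c kr kc hc8 hkr8 hkc8 hkc)
          obtain ⟨l1, l2, hsplit, hnk⟩ := first_split hkmem
          rw [hsplit, List.map_append, List.map_cons]
          apply bfs_first_hit
          · intro e he
            obtain ⟨m, hm, rfl⟩ := List.mem_map.1 he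
            have hml : m ∈ pvMovesFrom (c : Int) (r : Int) := hsplit ▸ List.mem_append_left _ hm
            exact ⟨fun h => hnk (h ▸ hm), hallcan m hml⟩
          · have h1 := congrArg List.length hsplit
            have h2 := movesFrom_len (c : Int) (r : Int)
            simp only [List.length_append, List.length_cons] at h1
            simp only [List.length_map]
            omega
        · -- two rook moves via the intermediate square (kc, r)
          obtain ⟨hkc, hkr⟩ := not_or.1 hcr
          rw [halt, if_neg (not_or.2 ⟨hkc, hkr⟩), hstart]
          have hX : pvSq kc r ∈ pvRay (c : Int) (r : Int) 1 0 7 1 ++ pvRay (c : Int) (r : Int) (-1) 0 7 1 :=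
            mem_rowMoves c r kc hc8 hr8 hkc8 hkc
          obtain ⟨t1, t2, hsplit, hnX⟩ := first_split hX
          have hq : pvMovesFrom (c : Int) (r : Int) =
              t1 ++ pvSq kc r :: (t2 ++ (pvRay (c : Int) (r : Int) 0 1 7 1 ++ pvRay (c : Int) (r : Int) 0 (-1) 7 1)) := by
            rw [movesFrom_eq, hsplit]
            simp [List.append_assoc]
          have hne_all := moves_ne_king hc8 hr8 hkc8 hkr8 hkc hkr
          rw [hq, List.map_append, List.map_cons]
          have hres := bfs_second_hit (pvSq kc kr) (List.map (fun m => (m, [rook, m])) t1) 999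
            (pvSq kc r) [rook, pvSq kc r]
            (List.map (fun m => (m, [rook, m])) (t2 ++ (pvRay (c : Int) (r : Int) 0 1 7 1 ++ pvRay (c : Int) (r : Int) 0 (-1) 7 1)))
            (PySem.Set.add PySem.Set.empty rook)
            ?_ ?_ ?_ ?_ ?_ ?_
          · exact hres
          · -- level-1 row entries before the intermediate square
            intro e he
            obtain ⟨m, hm, rfl⟩ := List.mem_map.1 he
            have hmrow : m ∈ pvRay (c : Int) (r : Int) 1 0 7 1 ++ pvRay (c : Int) (r : Int) (-1) 0 7 1 :=
              hsplit ▸ List.mem_append_left _ hm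
            obtain ⟨i, hi, rfl, hic⟩ := rowMoves_shape c r hc8 hr8 m hmrow
            have hik : i ≠ kc := by
              intro h
              exact hnX (h ▸ hm)
            refine ⟨?_, pvMovesFrom (i : Int) (r : Int), movesOpt_canon i r hi hr8, ?_⟩
            · intro h
              obtain ⟨-, h2⟩ := pvSq_inj hi hr8 hkc8 hkr8 h
              exact hkr h2.symm
            · intro hkin
              obtain ⟨i', hi', j', hj', he', hcond⟩ := moves_shape i r hi hr8 _ hkin
              obtain ⟨rfl, rfl⟩ := pvSq_inj hkc8 hkr8 hi' hj' he'
              rcases hcond with ⟨h1, -⟩ | ⟨h1, -⟩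
              · exact hkr h1
              · exact hik h1.symm
          · -- entries after the intermediate square
            intro e he
            obtain ⟨m, hm, rfl⟩ := List.mem_map.1 he
            have hmall : m ∈ pvMovesFrom (c : Int) (r : Int) := by
              rw [hq]
              exact List.mem_append_right _ (List.mem_cons_of_mem _ hm)
            exact ⟨hne_all m hmall, hallcan m hmall⟩
          · -- the intermediate square is not the king
            intro h
            obtain ⟨-, h2⟩ := pvSq_inj hkc8 hr8 hkc8 hkr8 h
            exact hkr h2.symm
          · -- the king is one move from the intermediate square
            refine ⟨pvMovesFrom (kc : Int) (r : Int), movesOpt_canon kc r hkc8 hr8, ?_⟩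
            rw [movesFrom_eq]
            exact List.mem_append_right _ (mem_colMoves kc r kr hkc8 hr8 hkr8 hkr)
          · have hok : pvSq kc kr ≠ rook := fun h => hrk h.symm
            simp [PySem.Set.add, PySem.Set.contains, PySem.Set.empty, hok]
          · -- fuel bound
            have l1 := ray_len (c : Int) (r : Int) 1 0 7 1
            have l2 := ray_len (c : Int) (r : Int) (-1) 0 7 1
            have l3 := ray_len (c : Int) (r : Int) 0 1 7 1
            have l4 := ray_len (c : Int) (r : Int) 0 (-1) 7 1
            have hsl := congrArg List.length hsplit
            simp only [List.length_append, List.length_cons] at hsl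
            simp only [List.length_map, List.length_append]
            omega
    · -- the king string is not a reachable square: both sides give none
      have hA : bfs_rook_to_king rook king = none := by
        rw [hstart]
        apply bfs_drain king hcanon
        intro e he
        obtain ⟨m, hm, rfl⟩ := List.mem_map.1 he
        obtain ⟨i, hi, j, hj, rfl, -⟩ := moves_shape c r hc8 hr8 m hm
        intro h
        exact hcanon (h ▸ ⟨i, hi, j, hj, rfl⟩)
      rw [hA]
      unfold bfs_rook_to_king_alt
      simp only [beq_eq_false_iff_ne.2 hrk, Bool.false_eq_true, if_false, hg0, hc, hg1, hr]
      cases hkl : king.toList with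
      | nil => rfl
      | cons k0 t =>
        cases t with
        | nil => rfl
        | cons k1 t2 =>
          cases t2 with
          | cons z t3 => rfl
          | nil =>
            by_cases hmemb : k0 ∈ pvColumns ∧ k1 ∈ pvRows
            · exfalso
              obtain ⟨kc, hkc8, hkc, hkca⟩ := col_of_mem (by simpa using hmemb.1)
              obtain ⟨kr, hkr8, hkr, hkrb⟩ := row_of_mem (by simpa using hmemb.2)
              apply hcanon
              refine ⟨kc, hkc8, kr, hkr8, ?_⟩
              apply String.toList_inj.1
              rw [hkl, pvSq_toList, hkca, hkrb]
            · simp [hmemb]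

theorem bfs_rook_to_king_changed : Claim_changed_bfs_rook_to_king := by
  unfold Claim_changed_bfs_rook_to_king; decide

theorem bfs_rook_to_king_tight : Claim_exact_bfs_rook_to_king := by
  intro rook king hdom hpre hd
  obtain ⟨hrk, hklen, hk0, hk1, he0, he1⟩ := hd
  obtain ⟨k0, k1, hkl⟩ : ∃ k0 k1, king.toList = [k0, k1] := by
    have h2 : king.toList.length = 2 := by simpa using hklen
    cases hT : king.toList with
    | nil => rw [hT] at h2; simp at h2
    | cons x t =>
      cases t with
      | nil => rw [hT] at h2; simp at h2
      | cons y t2 =>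
        cases t2 with
        | nil => exact ⟨x, y, rfl⟩
        | cons z t3 => rw [hT] at h2; simp at h2
  rw [hkl] at hk0 hk1 he0 he1
  simp only [List.getElem?_cons_zero, List.getElem?_cons_succ, Option.any_some] at hk0 hk1 he0 he1
  obtain ⟨kc, hkc8, hkc, hkca⟩ := col_of_mem hk0
  obtain ⟨kr, hkr8, hkr, hkrb⟩ := row_of_mem hk1
  have hking : king = pvSq kc kr := by
    apply String.toList_inj.1
    rw [hkl, pvSq_toList, hkca, hkrb]
  obtain ⟨rest, hl⟩ : ∃ rest, rook.toList = k0 :: k1 :: rest := by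
    cases hT : rook.toList with
    | nil => rw [hT] at he0; simp at he0
    | cons x t =>
      cases t with
      | nil => rw [hT] at he1; simp at he1
      | cons y t2 =>
        rw [hT] at he0 he1
        simp at he0 he1
        exact ⟨t2, by rw [he0, he1]⟩
  subst hking
  have hnr := moves_ne_rook hl hkc8 hkr8 hkca hkrb
  have hstart := bfs_start (c := kc) (r := kr) hrk hl hkc hkr hnr
  have halt := alt_canon hrk hl hkc hkr hkc8 hkr8 hkr8
  rw [halt, if_pos (Or.inl rfl)]
  -- the move list of the rook's square is nonempty
  have hi0 : (if kc = 0 then 1 else 0) ≠ kc ∧ (if kc = 0 then 1 else 0) < 8 := by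
    split <;> omega
  have hmem0 : pvSq (if kc = 0 then 1 else 0) kr ∈ pvMovesFrom (kc : Int) (kr : Int) := by
    rw [movesFrom_eq]
    exact List.mem_append_left _ (mem_rowMoves kc kr _ hkc8 hkr8 hi0.2 hi0.1)
  cases hmv : pvMovesFrom (kc : Int) (kr : Int) with
  | nil => rw [hmv] at hmem0; cases hmem0
  | cons m0 restMv =>
    have hm0 : m0 ∈ pvMovesFrom (kc : Int) (kr : Int) := by rw [hmv]; exact List.mem_cons_self
    obtain ⟨i, hi, j, hj, hm0e, hcond⟩ := moves_shape kc kr hkc8 hkr8 m0 hm0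
    have hres := bfs_second_hit (pvSq kc kr) [] 999 m0 [rook, m0]
      (List.map (fun m => (m, [rook, m])) restMv) (PySem.Set.add PySem.Set.empty rook)
      (by intro e he; cases he) ?_ ?_ ?_ ?_ ?_
    · rw [hstart, hmv, List.map_cons]
      rw [List.nil_append] at hres
      rw [hres]
      simp
    · intro e he
      obtain ⟨m, hm, rfl⟩ := List.mem_map.1 he
      have hmall : m ∈ pvMovesFrom (kc : Int) (kr : Int) := by
        rw [hmv]; exact List.mem_cons_of_mem _ hm
      refine ⟨moves_ne_self hkc8 hkr8 m hmall, ?_⟩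
      obtain ⟨i', hi', j', hj', rfl, -⟩ := moves_shape kc kr hkc8 hkr8 m hmall
      rw [movesOpt_canon i' j' hi' hj']
      simp
    · exact moves_ne_self hkc8 hkr8 m0 hm0
    · refine ⟨pvMovesFrom (i : Int) (j : Int), by rw [hm0e]; exact movesOpt_canon i j hi hj, ?_⟩
      rcases hcond with ⟨hjk, hne⟩ | ⟨hik, hne⟩
      · rw [movesFrom_eq, hjk]
        exact List.mem_append_left _ (mem_rowMoves i kr kc hi hkr8 hkc8 (fun h => hne h.symm))
      · rw [movesFrom_eq, hik]
        exact List.mem_append_right _ (mem_colMoves kc j kr hkc8 hj hkr8 (fun h => hne h.symm))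
    · have hok : pvSq kc kr ≠ rook := fun h => hrk h.symm
      simp [PySem.Set.add, PySem.Set.contains, PySem.Set.empty, hok]
    · have h1 := movesFrom_len (kc : Int) (kr : Int)
      rw [hmv] at h1
      simp only [List.length_nil, List.length_map, List.length_cons] at h1 ⊢
      omega
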